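-- pv_equiv track=rewrite | github.com/vijith2121/qt-1 | qt 2.py | reconstruct_string
-- ===== SOURCE A (Python) =====
-- def reconstruct_string(input_string):
--     i = 0
--     reps = []
--     while i < len(input_string):
--         count = 1
--         while i < len(input_string)-1 and input_string[i] == input_string[i+1]:
--             count += 1
--             i += 1
--             j = i
--         while count >= 4:
--             reps.append(j)
--             j -= 1
--             count -= 1
--         i += 1
--     return "".join([input_string[x] for x in range(len(input_string)) if x not in reps])
-- ===== SOURCE B (Python) =====
-- def reconstruct_string(input_string):
--     out = []
--     prev = None
--     count = 0
--     for ch in input_string: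
--         if ch == prev:
--             count += 1
--         else:
--             prev = ch
--             count = 1
--         if count <= 3:
--             out.append(ch)
--     return "".join(out)
-- ===== Notes on version B (the rewrite author's own statement) =====
-- stated objective: faster
-- what changed: Replaced A's two-phase scheme (index scan collecting removal indices per run, then a filtering pass over range(len) with an O(len(reps)) list-membership test per index) by a single streaming pass that maintains (prev, count) and emits a char only while its run count is at most 3.
import Mathlib
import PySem

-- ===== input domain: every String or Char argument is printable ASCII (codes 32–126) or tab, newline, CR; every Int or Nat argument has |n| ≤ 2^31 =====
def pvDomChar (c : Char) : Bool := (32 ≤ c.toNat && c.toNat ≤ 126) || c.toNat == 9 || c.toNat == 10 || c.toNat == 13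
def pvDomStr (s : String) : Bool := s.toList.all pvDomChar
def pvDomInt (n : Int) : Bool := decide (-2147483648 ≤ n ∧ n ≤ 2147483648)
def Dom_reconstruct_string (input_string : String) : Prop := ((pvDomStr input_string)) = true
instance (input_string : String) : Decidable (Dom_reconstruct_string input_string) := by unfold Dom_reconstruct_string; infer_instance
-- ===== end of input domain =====

-- B replaces A's two-phase scheme (collect removal indices per run, then filter range(len)
-- by membership) with a single streaming pass maintaining (prev, count); objective: simpler.

-- ===== PORT A =====
-- `while count >= 4: reps.append(j); j -= 1; count -= 1`  (structural on the loop's own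
-- bound: the loop runs exactly max(count-3,0) ≤ count.toNat times, the fuel at the call)
def aRemove (fuel : Nat) (reps : List Int) (j count : Int) : List Int :=
  match fuel with
  | 0 => reps
  | f + 1 => if 4 ≤ count then aRemove f (reps ++ [j]) (j - 1) (count - 1) else reps

-- inner `while i < len-1 and s[i] == s[i+1]: count += 1; i += 1; j = i`  (each step
-- increments i below len-1, so len steps of fuel always suffice)
def aInner (cs : List Char) (fuel : Nat) (i count j : Int) : Int × Int × Int :=
  match fuel with
  | 0 => (i, count, j)
  | f + 1 =>
    if i < (cs.length : Int) - 1 ∧ PySem.List.pyGet? cs i = PySem.List.pyGet? cs (i + 1) then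
      aInner cs f (i + 1) (count + 1) (i + 1)
    else (i, count, j)

-- outer `while i < len: count = 1; <inner>; <removal>; i += 1`  (i grows by ≥ 1 per
-- iteration, so len steps of fuel always suffice; Python's j is read only after the
-- inner loop has set it; the initial 0 here is an arbitrary unread value)
def aOuter (cs : List Char) (fuel : Nat) (i j : Int) (reps : List Int) : List Int :=
  match fuel with
  | 0 => reps
  | f + 1 =>
    if i < (cs.length : Int) then
      aOuter cs f ((aInner cs cs.length i 1 j).1 + 1) (aInner cs cs.length i 1 j).2.2
        (aRemove (aInner cs cs.length i 1 j).2.1.toNat reps (aInner cs cs.length i 1 j).2.2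
          (aInner cs cs.length i 1 j).2.1)
    else reps

def reconstruct_string (input_string : String) : String :=
  let cs := input_string.toList
  let reps := aOuter cs cs.length 0 0 []
  -- "".join([input_string[x] for x in range(len) if x not in reps]); x is always in range,
  -- so the pyGet? is always `some` and the ' ' default is never used
  String.mk (((List.range cs.length).filter (fun x => !reps.contains ((x : Nat) : Int))).map
    (fun x => (PySem.List.pyGet? cs ((x : Nat) : Int)).getD ' '))

-- ===== PORT B =====
-- for ch in s: if ch == prev: count += 1 else: prev = ch; count = 1; if count <= 3: emit ch
def bLoop (cs : List Char) (prev : Option Char) (count : Int) : List Char :=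
  match cs with
  | [] => []
  | c :: rest =>
    let s := if some c = prev then (prev, count + 1) else (some c, (1 : Int))
    (if s.2 ≤ 3 then [c] else []) ++ bLoop rest s.1 s.2

def reconstruct_string_alt (input_string : String) : String :=
  String.mk (bLoop input_string.toList none 0)

-- ===== PRECONDITION & SPEC =====
def Spec_reconstruct_string (input_string : String) (out : String) : Prop := out = reconstruct_string_alt input_string
instance (input_string : String) (out : String) : Decidable (Spec_reconstruct_string input_string out) := by unfold Spec_reconstruct_string; infer_instance

-- ===== CLAIM (what is proved, stated in full; the proofs are below) =====
def Claim_equal_reconstruct_string : Prop := ∀ (input_string : String), Dom_reconstruct_string input_string → Spec_reconstruct_string input_string (reconstruct_string input_string)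

-- ===== LEMMAS AND PROOFS =====

-- `keep3` keeps the first min(run,3) characters of each maximal run: common spec of A and B
def keep3 : List Char → List Char
  | [] => []
  | c :: rest =>
    List.replicate (min ((rest.takeWhile (· == c)).length + 1) 3) c
      ++ keep3 (rest.dropWhile (· == c))
termination_by l => l.length
decreasing_by simpa using Nat.lt_succ_of_le (List.length_dropWhile_le _ _)

-- relative removal predicate: remB l x ↔ position x of l is the 4th-or-later char of its run
def remB : List Char → Int → Bool
  | [], _ => false
  | c :: rest, x =>
    (decide (3 ≤ x) && decide (x ≤ ((rest.takeWhile (· == c)).length : Int)))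
      || remB (rest.dropWhile (· == c)) (x - (((rest.takeWhile (· == c)).length : Int) + 1))
termination_by l _ => l.length
decreasing_by simpa using Nat.lt_succ_of_le (List.length_dropWhile_le _ _)

theorem dropWhile_eq_drop_len (p : Char → Bool) (l : List Char) :
    l.dropWhile p = l.drop (l.takeWhile p).length := by
  conv_lhs => rw [← List.drop_left (l₁ := l.takeWhile p) (l₂ := l.dropWhile p)]
  rw [List.takeWhile_append_dropWhile]

theorem remB_cons (c : Char) (rest : List Char) (x : Int) : remB (c :: rest) x =
    ((decide (3 ≤ x) && decide (x ≤ ((rest.takeWhile (· == c)).length : Int)))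
      || remB (rest.dropWhile (· == c)) (x - (((rest.takeWhile (· == c)).length : Int) + 1))) := by
  rw [remB.eq_def]

theorem remB_pos (l : List Char) (x : Int) (h : remB l x = true) : 3 ≤ x := by
  fun_induction remB l x with
  | case1 => simp at h
  | case2 c rest x ih =>
    rw [remB.eq_def] at h
    simp only [Bool.or_eq_true, Bool.and_eq_true, decide_eq_true_eq] at h
    rcases h with ⟨h1, _⟩ | h2
    · exact h1
    · have := ih (by rw [remB.eq_def]; exact h2); omega

theorem aRemove_mem (f : Nat) (reps : List Int) (j c x : Int) (hf : c ≤ (f : Int)) :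
    x ∈ aRemove f reps j c ↔ x ∈ reps ∨ (4 ≤ c ∧ j - (c - 4) ≤ x ∧ x ≤ j) := by
  induction f generalizing reps j c with
  | zero => rw [aRemove]; constructor
            · exact fun h => Or.inl h
            · rintro (h1 | ⟨h4, _, _⟩)
              · exact h1
              · exfalso; simp at hf; omega
  | succ f ih =>
    rw [aRemove]
    by_cases h : 4 ≤ c
    · rw [if_pos h, ih _ _ _ (by push_cast at hf ⊢; omega)]
      simp only [List.mem_append, List.mem_singleton]
      constructor
      · rintro ((h1 | rfl) | h2)
        · exact Or.inl h1
        · exact Or.inr ⟨by omega, by omega, by omega⟩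
        · exact Or.inr ⟨by omega, by omega, by omega⟩
      · rintro (h1 | ⟨h4, hl, hr⟩)
        · exact Or.inl (Or.inl h1)
        · by_cases hx : x = j
          · exact Or.inl (Or.inr hx)
          · exact Or.inr ⟨by omega, by omega, by omega⟩
    · rw [if_neg h]
      constructor
      · exact fun h1 => Or.inl h1
      · rintro (h1 | ⟨h4, _, _⟩)
        · exact h1
        · exact absurd h4 h

theorem aInner_spec (cs : List Char) (f : Nat) (i : Nat) (hi : i < cs.length)
    (hf : ((cs.drop (i+1)).takeWhile (· == cs[i])).length ≤ f) (m j : Int) :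
    aInner cs f (i : Int) m j =
      (((i + ((cs.drop (i+1)).takeWhile (· == cs[i])).length : Nat) : Int),
       m + (((cs.drop (i+1)).takeWhile (· == cs[i])).length : Int),
       if ((cs.drop (i+1)).takeWhile (· == cs[i])).length = 0 then j
       else ((i + ((cs.drop (i+1)).takeWhile (· == cs[i])).length : Nat) : Int)) := by
  induction f generalizing i m j with
  | zero =>
    rw [aInner, show ((cs.drop (i+1)).takeWhile (· == cs[i])).length = 0 from by omega]
    simp
  | succ f ih =>
    rw [aInner]
    have hcast : ((i : Int) + 1) = (((i + 1 : Nat)) : Int) := by push_cast; ring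
    by_cases hlt : i + 1 < cs.length
    · -- s[i+1] exists
      have hg1 : PySem.List.pyGet? cs (i : Int) = some cs[i] := by
        simp [List.getElem?_eq_getElem hi]
      have hg2 : PySem.List.pyGet? cs ((i : Int) + 1) = some cs[i+1] := by
        rw [hcast, PySem.List.pyGet?_natCast, List.getElem?_eq_getElem hlt]
      by_cases heq : cs[i] = cs[i+1]
      · -- take a step
        have hdrop : cs.drop (i+1) = cs[i+1] :: cs.drop (i+2) := List.drop_eq_getElem_cons hlt
        have hrun : ((cs.drop (i+1)).takeWhile (· == cs[i])).length
            = ((cs.drop (i+1+1)).takeWhile (· == cs[i+1])).length + 1 := by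
          rw [hdrop, List.takeWhile_cons,
            show (cs[i+1] == cs[i]) = true from by simp [heq], heq]
          simp
        have hcond : (i : Int) < (cs.length : Int) - 1 ∧
            PySem.List.pyGet? cs (i : Int) = PySem.List.pyGet? cs ((i : Int) + 1) := by
          refine ⟨by omega, by rw [hg1, hg2, heq]⟩
        rw [if_pos hcond, hcast, ih (i+1) hlt (by omega) (m+1) ((i+1 : Nat) : Int)]
        rw [hrun]
        refine Prod.ext ?_ (Prod.ext ?_ ?_)
        · simp only []
          congr 1
          omega
        · simp only []
          push_cast
          ring
        · simp only []
          by_cases he : ((cs.drop (i+1+1)).takeWhile (· == cs[i+1])).length = 0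
          · rw [if_pos he, if_neg (by omega : ¬ (((cs.drop (i+1+1)).takeWhile (· == cs[i+1])).length + 1 = 0)), he]
          · simp only [if_neg he, if_neg (by omega : ¬ (((cs.drop (i+1+1)).takeWhile (· == cs[i+1])).length + 1 = 0))]
            congr 1
            omega
      · -- run stops: neighbour differs
        have hrun : ((cs.drop (i+1)).takeWhile (· == cs[i])).length = 0 := by
          rw [List.drop_eq_getElem_cons hlt, List.takeWhile_cons,
            show (cs[i+1] == cs[i]) = false from by
              simp only [beq_eq_false_iff_ne, ne_eq]
              exact fun hc => heq hc.symm]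
          simp
        have hcond : ¬ ((i : Int) < (cs.length : Int) - 1 ∧
            PySem.List.pyGet? cs (i : Int) = PySem.List.pyGet? cs ((i : Int) + 1)) := by
          rw [hg1, hg2]
          intro ⟨_, hc⟩
          exact heq (Option.some.inj hc)
        rw [if_neg hcond, hrun]
        simp
    · -- i is the last index
      have hrun : ((cs.drop (i+1)).takeWhile (· == cs[i])).length = 0 := by
        rw [List.drop_eq_nil_of_le (by omega), List.takeWhile_nil, List.length_nil]
      have hcond : ¬ ((i : Int) < (cs.length : Int) - 1 ∧
          PySem.List.pyGet? cs (i : Int) = PySem.List.pyGet? cs ((i : Int) + 1)) := by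
        intro ⟨hc, _⟩
        omega
      rw [if_neg hcond, hrun]
      simp

theorem aOuter_mem (cs : List Char) (f i : Nat) (hf : cs.length - i ≤ f) (hi : i ≤ cs.length) (j : Int) (reps : List Int) (x : Int) :
    x ∈ aOuter cs f (i : Int) j reps ↔ x ∈ reps ∨ remB (cs.drop i) (x - i) = true := by
  have H : ∀ (N i : Nat), cs.length - i ≤ N → i ≤ cs.length → ∀ (j : Int) (reps : List Int),
      x ∈ aOuter cs N (i : Int) j reps ↔ x ∈ reps ∨ remB (cs.drop i) (x - i) = true := by
    intro N
    induction N with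
    | zero =>
      intro i hN hi j reps
      have hieq : i = cs.length := by omega
      rw [aOuter, hieq, List.drop_length]
      simp [remB]
    | succ N ih =>
      intro i hN hi j reps
      by_cases hlt : i < cs.length
      · rw [aOuter, if_pos (by exact_mod_cast hlt : (i : Int) < (cs.length : Int))]
        have heb : ((cs.drop (i+1)).takeWhile (· == cs[i])).length ≤ cs.length := by
          have h1 := List.IsPrefix.length_le (List.takeWhile_prefix (l := cs.drop (i+1)) (· == cs[i]'hlt))
          rw [List.length_drop] at h1
          omega
        rw [aInner_spec cs cs.length i hlt heb 1 j]
        set e := ((cs.drop (i+1)).takeWhile (· == cs[i])).length with he_def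
        have hebound : e ≤ cs.length - (i + 1) := by
          have h1 := List.IsPrefix.length_le (List.takeWhile_prefix (l := cs.drop (i+1)) (· == cs[i]'hlt))
          rw [List.length_drop] at h1
          omega
        simp only []
        have hstep : (((i + e : Nat) : Int) + 1) = (((i + e + 1 : Nat)) : Int) := by push_cast; ring
        rw [hstep, ih (i + e + 1) (by omega) (by omega)]
        rw [aRemove_mem _ _ _ _ _ (Int.self_le_toNat _)]
        have hdropi : cs.drop i = cs[i] :: cs.drop (i + 1) := List.drop_eq_getElem_cons hlt
        have hdrop2 : (cs.drop (i+1)).dropWhile (· == cs[i]) = cs.drop (i + e + 1) := by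
          rw [dropWhile_eq_drop_len, ← he_def, List.drop_drop]
          congr 1
          omega
        rw [hdropi, remB_cons, hdrop2, ← he_def]
        clear_value e
        have harg : x - (i : Int) - ((e : Int) + 1) = x - ((i + e + 1 : Nat) : Int) := by
          push_cast; ring
        simp only [Bool.or_eq_true, Bool.and_eq_true, decide_eq_true_eq]
        rw [harg]
        by_cases hez : e = 0
        · subst hez
          simp only [reduceIte]
          constructor
          · rintro ((h1 | h2) | h3)
            · exact Or.inl h1
            · exfalso; have := h2.1; omega
            · exact Or.inr (Or.inr h3)
          · rintro (h1 | ⟨h3, h4⟩ | h5)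
            · exact Or.inl (Or.inl h1)
            · exfalso; omega
            · exact Or.inr h5
        · simp only [if_neg hez]
          constructor
          · rintro ((h1 | ⟨h4, hl, hr⟩) | h3)
            · exact Or.inl h1
            · exact Or.inr (Or.inl ⟨by omega, by omega⟩)
            · exact Or.inr (Or.inr h3)
          · rintro (h1 | ⟨h3, h4⟩ | h5)
            · exact Or.inl (Or.inl h1)
            · exact Or.inl (Or.inr ⟨by omega, by omega, by omega⟩)
            · exact Or.inr h5
      · have hieq : i = cs.length := by omega
        rw [aOuter, if_neg (by omega : ¬ ((i : Int) < (cs.length : Int)))]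
        rw [hieq, List.drop_length]
        simp [remB]
  exact H f i hf hi j reps

theorem filter_range_lt (n k : Nat) :
    (List.range n).filter (fun d => decide (d < k)) = List.range (min n k) := by
  induction n with
  | zero => simp
  | succ n ih =>
    rw [List.range_succ, List.filter_append, ih]
    by_cases h : n < k
    · have h2 : min (n + 1) k = n + 1 := by omega
      have h3 : min n k = n := by omega
      simp [h, h3, List.range_succ]
    · have : min (n + 1) k = min n k := by omega
      simp [h, this]

theorem keep3_of_A (l : List Char) :
    ((List.range l.length).filter (fun d => !remB l ((d : Nat) : Int))).map
      (fun d => l.getD d ' ') = keep3 l := by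
  have H : ∀ (N : Nat) (l : List Char), l.length ≤ N →
      ((List.range l.length).filter (fun d => !remB l ((d : Nat) : Int))).map
        (fun d => l.getD d ' ') = keep3 l := by
    intro N
    induction N with
    | zero =>
      intro l hl
      have hnil : l = [] := List.length_eq_zero_iff.mp (by omega)
      subst hnil
      simp [keep3]
    | succ N ih =>
      intro l hl
      match l with
      | [] => simp [keep3]
      | c :: rest =>
        set e := (rest.takeWhile (· == c)).length with he_def
        set dw := rest.dropWhile (· == c) with hdw_def
        clear_value e dw
        have hsplit : (c :: rest).length = (e + 1) + dw.length := by
          have hlen := congrArg List.length (List.takeWhile_append_dropWhile (p := (· == c)) (l := rest))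
          rw [List.length_append] at hlen
          rw [he_def, hdw_def]
          simp only [List.length_cons]
          omega
        have hrun_getD : ∀ d : Nat, d ≤ e → (c :: rest).getD d ' ' = c := by
          intro d hd
          match d with
          | 0 => rfl
          | d + 1 =>
            have hde : d < (rest.takeWhile (· == c)).length := by rw [← he_def]; omega
            have hdr : d < rest.length := by
              have := List.IsPrefix.length_le (List.takeWhile_prefix (l := rest) (· == c))
              omega
            have hpr : (rest.takeWhile (· == c))[d] = rest[d] :=
              List.IsPrefix.getElem (List.takeWhile_prefix (· == c)) hde
            have hmem : ((rest.takeWhile (· == c))[d] == c) = true :=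
              List.mem_takeWhile_imp (p := (· == c)) (l := rest) (List.getElem_mem hde)
            have hc : rest[d] = c := by rw [hpr] at hmem; simpa using hmem
            show rest.getD d ' ' = c
            rw [List.getD_eq_getElem?_getD, List.getElem?_eq_getElem hdr, hc]
            rfl
        rw [hsplit, List.range_add, List.filter_append, List.map_append]
        have hB1 : ((List.range (e + 1)).filter (fun d => !remB (c :: rest) ((d : Nat) : Int))).map
            (fun d => (c :: rest).getD d ' ') = List.replicate (min (e + 1) 3) c := by
          have hf : (List.range (e + 1)).filter (fun d => !remB (c :: rest) ((d : Nat) : Int))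
              = (List.range (e + 1)).filter (fun d => decide (d < 3)) := by
            apply List.filter_congr
            intro d hd
            rw [List.mem_range] at hd
            rw [remB_cons, ← he_def, ← hdw_def]
            have htail : remB dw (((d : Nat) : Int) - ((e : Int) + 1)) = false := by
              cases hx : remB dw (((d : Nat) : Int) - ((e : Int) + 1)) with
              | false => rfl
              | true => exact absurd (remB_pos _ _ hx) (by omega)
            rw [htail]
            by_cases h3 : d < 3
            · have h4 : ¬ (3 ≤ ((d : Nat) : Int)) := by omega
              simp [h3, h4]
            · have h4 : (3 ≤ ((d : Nat) : Int)) := by omega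
              have h5 : (((d : Nat) : Int) ≤ ((e : Nat) : Int)) := by omega
              simp [h3, h4, h5]
          rw [hf, filter_range_lt]
          have hall : ∀ b ∈ (List.range (min (e + 1) 3)).map (fun d => (c :: rest).getD d ' '), b = c := by
            intro b hb
            rw [List.mem_map] at hb
            obtain ⟨d, hd, rfl⟩ := hb
            rw [List.mem_range] at hd
            exact hrun_getD d (by omega)
          rw [List.eq_replicate_of_mem hall]
          simp
        have hB2 : (((List.range dw.length).map (fun x => (e + 1) + x)).filter
              (fun d => !remB (c :: rest) ((d : Nat) : Int))).map (fun d => (c :: rest).getD d ' ')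
            = keep3 dw := by
          rw [List.filter_map, List.map_map]
          have hf : (List.range dw.length).filter ((fun d => !remB (c :: rest) ((d : Nat) : Int)) ∘ (fun x => (e + 1) + x))
              = (List.range dw.length).filter (fun d => !remB dw ((d : Nat) : Int)) := by
            apply List.filter_congr
            intro d hd
            simp only [Function.comp_apply]
            rw [remB_cons, ← he_def, ← hdw_def]
            have harg : (((e + 1) + d : Nat) : Int) - ((e : Int) + 1) = ((d : Nat) : Int) := by
              push_cast; ring
            rw [harg]
            have hx : decide ((((e + 1) + d : Nat) : Int) ≤ ((e : Nat) : Int)) = false := by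
              simp only [decide_eq_false_iff_not]
              push_cast
              omega
            rw [hx, Bool.and_false, Bool.false_or]
          rw [hf]
          have hg : ∀ d ∈ (List.range dw.length).filter (fun d => !remB dw ((d : Nat) : Int)),
              ((fun d => (c :: rest).getD d ' ') ∘ (fun x => (e + 1) + x)) d = dw.getD d ' ' := by
            intro d hd
            have hdm : d < dw.length := by
              have := List.mem_filter.mp hd
              simpa using List.mem_range.mp this.1
            simp only [Function.comp_apply]
            have hdrop : (c :: rest).drop (e + 1) = dw := by
              show rest.drop e = dw
              rw [hdw_def, dropWhile_eq_drop_len, he_def]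
            rw [List.getD_eq_getElem?_getD, List.getD_eq_getElem?_getD, ← hdrop,
              List.getElem?_drop]
          rw [List.map_congr_left hg]
          apply ih
          have hr := List.length_dropWhile_le (· == c) rest
          rw [← hdw_def] at hr
          simp only [List.length_cons] at hl
          omega
        rw [hB1, hB2, keep3, ← he_def, ← hdw_def]
  exact H l.length l le_rfl

theorem bLoop_replicate (k : Nat) (c : Char) (rest : List Char) (m : Nat) :
    bLoop (List.replicate k c ++ rest) (some c) ((m : Nat) : Int) =
      List.replicate (min k (3 - m)) c ++ bLoop rest (some c) (((m + k : Nat)) : Int) := by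
  induction k generalizing m with
  | zero => simp
  | succ k ih =>
    rw [List.replicate_succ, List.cons_append, bLoop]
    have hc : ((m : Int) + 1) = ((m + 1 : Nat) : Int) := by push_cast; ring
    simp only [if_true, hc]
    rw [ih (m + 1)]
    by_cases hm : m + 1 ≤ 3
    · have h1 : min (k + 1) (3 - m) = min k (3 - (m + 1)) + 1 := by omega
      have h2 : (((m + 1 : Nat) : Int) ≤ 3) := by exact_mod_cast hm
      have h3 : m + 1 + k = m + (k + 1) := by omega
      rw [if_pos h2, h1, List.replicate_succ, h3]
      simp
    · have h1 : min (k + 1) (3 - m) = min k (3 - (m + 1)) := by omega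
      have h2 : ¬ (((m + 1 : Nat) : Int) ≤ 3) := by exact_mod_cast hm
      have h3 : m + 1 + k = m + (k + 1) := by omega
      rw [if_neg h2, h1, h3]
      simp

theorem head?_dropWhile_ne (c : Char) (rest : List Char) (c' : Char)
    (hc' : (rest.dropWhile (· == c)).head? = some c') : c' ≠ c := by
  have := List.head?_dropWhile_not (· == c) rest
  rw [hc'] at this
  simpa using this

theorem run_decomp (c : Char) (rest : List Char) :
    rest = List.replicate (rest.takeWhile (· == c)).length c ++ rest.dropWhile (· == c) := by
  conv_lhs => rw [← List.takeWhile_append_dropWhile (p := (· == c)) (l := rest)]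
  congr 1
  exact List.eq_replicate_of_mem (fun b hb => by simpa using List.mem_takeWhile_imp hb)

theorem bLoop_keep3_aux (N : Nat) : ∀ (l : List Char), l.length ≤ N → ∀ (p : Option Char) (n : Int),
    (∀ c, l.head? = some c → p ≠ some c) → bLoop l p n = keep3 l := by
  induction N with
  | zero =>
    intro l hl p n _
    have hnil : l = [] := List.length_eq_zero_iff.mp (by omega)
    subst hnil
    simp [bLoop, keep3]
  | succ N ih =>
    intro l hl p n h
    match l with
    | [] => simp [bLoop, keep3]
    | c :: rest =>
      have hp : ¬ (some c = p) := fun he => (h c rfl) he.symm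
      rw [bLoop, keep3]
      simp only [if_neg hp]
      have h13 : ((1 : Int) ≤ 3) := by omega
      rw [if_pos h13]
      conv_lhs => rw [run_decomp c rest]
      have h1 : ((1 : Int)) = (((1 : Nat)) : Int) := rfl
      rw [h1, bLoop_replicate]
      have hdw : bLoop (rest.dropWhile (· == c)) (some c) (((1 + (rest.takeWhile (· == c)).length : Nat)) : Int)
          = keep3 (rest.dropWhile (· == c)) := by
        apply ih
        · have := List.length_dropWhile_le (· == c) rest
          simp at hl; omega
        · intro c' hc' he
          exact head?_dropWhile_ne c rest c' hc' (by injection he.symm)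
      rw [hdw]
      have hm : min ((rest.takeWhile (· == c)).length + 1) 3 = min (rest.takeWhile (· == c)).length 2 + 1 := by omega
      rw [hm, List.replicate_succ]
      simp

theorem bLoop_keep3 (l : List Char) (p : Option Char) (n : Int)
    (h : ∀ c, l.head? = some c → p ≠ some c) : bLoop l p n = keep3 l :=
  bLoop_keep3_aux l.length l le_rfl p n h

-- ===== VERDICT (by name: the statement is the Claim_ definition above) =====
theorem reconstruct_string_spec : Claim_equal_reconstruct_string := by
  unfold Claim_equal_reconstruct_string
  intro s _
  unfold Spec_reconstruct_string reconstruct_string reconstruct_string_alt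
  show String.mk (((List.range s.toList.length).filter
      (fun x => !(aOuter s.toList s.toList.length 0 0 []).contains ((x : Nat) : Int))).map
      (fun x => (PySem.List.pyGet? s.toList ((x : Nat) : Int)).getD ' '))
    = String.mk (bLoop s.toList none 0)
  refine congrArg String.mk ?_
  have hmem : ∀ x : Int, x ∈ aOuter s.toList s.toList.length 0 0 [] ↔ remB s.toList x = true := by
    intro x
    have h := aOuter_mem s.toList s.toList.length 0 (by omega) (by omega) 0 [] x
    simpa using h
  have hfilter : (List.range s.toList.length).filter
      (fun x => !(aOuter s.toList s.toList.length 0 0 []).contains ((x : Nat) : Int))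
      = (List.range s.toList.length).filter (fun x => !remB s.toList ((x : Nat) : Int)) := by
    apply List.filter_congr
    intro d _
    have hc : (aOuter s.toList s.toList.length 0 0 []).contains ((d : Nat) : Int) = remB s.toList ((d : Nat) : Int) := by
      cases hx : remB s.toList ((d : Nat) : Int) with
      | true => exact List.contains_iff_mem.mpr ((hmem _).mpr hx)
      | false =>
        cases hy : (aOuter s.toList s.toList.length 0 0 []).contains ((d : Nat) : Int) with
        | false => rfl
        | true =>
          exact absurd ((hmem _).mp (List.contains_iff_mem.mp hy)) (by rw [hx]; simp)
    rw [hc]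
  rw [hfilter]
  have hget : (fun x : Nat => (PySem.List.pyGet? s.toList ((x : Nat) : Int)).getD ' ')
      = (fun x : Nat => s.toList.getD x ' ') := by
    funext x
    rw [PySem.List.pyGet?_natCast, List.getD_eq_getElem?_getD]
  rw [hget, keep3_of_A, bLoop_keep3]
  intro c hc he
  simp at he
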